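-- pv_equiv track=rewrite | github.com/sebunger/tortoisehg | tortoisehg/util/version.py | _decrement_version
-- ===== SOURCE A (Python) =====
-- def _decrement_version(v):
--     if not v:
--         return v
--     v = v[:]
--     p = len(v) - 1
--     v[p] -= 1
--     while p > 0 and v[p] < 0:
--         v[p] = 9
--         v[p - 1] -= 1
--         p -= 1
--     return v
-- ===== SOURCE B (Python) =====
-- def _decrement_version(v):
--     if not v:
--         return v
--     i = len(v) - 1
--     while i > 0 and v[i] <= 0:
--         i -= 1
--     return v[:i] + [v[i] - 1] + [9] * (len(v) - 1 - i)
-- ===== Notes on version B (the rewrite author's own statement) =====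
-- stated objective: alternative
-- what changed: Instead of decrementing the last digit and running a mutating borrow-propagation loop, B first locates the rightmost strictly positive digit (pivot) and then builds the result in one concatenation: prefix unchanged, pivot minus one, nines after it.
import Mathlib
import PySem

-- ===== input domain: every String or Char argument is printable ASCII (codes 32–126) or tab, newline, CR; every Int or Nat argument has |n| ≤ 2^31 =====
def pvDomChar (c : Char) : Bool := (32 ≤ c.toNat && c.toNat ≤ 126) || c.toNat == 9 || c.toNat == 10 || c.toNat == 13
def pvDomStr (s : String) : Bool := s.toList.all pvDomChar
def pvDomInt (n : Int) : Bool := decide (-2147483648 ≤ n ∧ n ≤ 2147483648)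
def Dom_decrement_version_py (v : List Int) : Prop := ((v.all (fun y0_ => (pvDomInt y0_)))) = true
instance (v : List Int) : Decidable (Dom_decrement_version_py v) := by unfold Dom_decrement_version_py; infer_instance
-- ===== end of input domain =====

-- B replaces A's mutating borrow-propagation loop by a pivot search plus one slice
-- concatenation (alternative decomposition, same O(n) cost).

-- ===== PORT A =====
-- the while loop: while p > 0 and v[p] < 0: v[p] = 9; v[p-1] -= 1; p -= 1
def pvLoopA (v : List Int) (p : Nat) : List Int :=
  if p > 0 ∧ v.getD p 0 < 0 then
    let v1 := v.set p 9
    let v2 := v1.set (p - 1) (v1.getD (p - 1) 0 - 1)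
    pvLoopA v2 (p - 1)
  else v
termination_by p
decreasing_by omega

def decrement_version_py (v : List Int) : List Int :=
  if v.isEmpty then v
  else
    let p := v.length - 1
    let v1 := v.set p (v.getD p 0 - 1)
    pvLoopA v1 p

-- ===== PORT B =====
-- the while loop: while i > 0 and v[i] <= 0: i -= 1
def pvPivot (v : List Int) (i : Nat) : Nat :=
  if i > 0 ∧ v.getD i 0 ≤ 0 then pvPivot v (i - 1) else i
termination_by i
decreasing_by omega

def decrement_version_py_alt (v : List Int) : List Int :=
  if v.isEmpty then v
  else
    let i := pvPivot v (v.length - 1)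
    v.take i ++ [v.getD i 0 - 1] ++ List.replicate (v.length - 1 - i) 9

-- ===== PRECONDITION & SPEC =====
def Spec_decrement_version_py (v : List Int) (out : List Int) : Prop := out = decrement_version_py_alt v
instance (v : List Int) (out : List Int) : Decidable (Spec_decrement_version_py v out) := by unfold Spec_decrement_version_py; infer_instance

-- ===== CLAIM (what is proved, stated in full; the proofs are below) =====
def Claim_equal_decrement_version_py : Prop := ∀ (v : List Int), Dom_decrement_version_py v → Spec_decrement_version_py v (decrement_version_py v)

-- ===== LEMMAS AND PROOFS =====

theorem pvGetD_set_ne (l : List Int) (i j : Nat) (x : Int) (h : j ≠ i) :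
    (l.set j x).getD i 0 = l.getD i 0 := by
  simp [List.getD_eq_getElem?_getD, List.getElem?_set_ne h]

theorem pvGetD_set_self (l : List Int) (j : Nat) (x : Int) (h : j < l.length) :
    (l.set j x).getD j 0 = x := by
  simp [List.getD_eq_getElem?_getD, h]

theorem pvPivot_le (v : List Int) (i : Nat) : pvPivot v i ≤ i := by
  induction i using Nat.strong_induction_on with
  | _ i ih =>
    unfold pvPivot
    split
    · next h => exact le_trans (ih (i-1) (by omega)) (by omega)
    · exact le_refl i

theorem pvPivot_set_high (v : List Int) (i p : Nat) (x : Int) (h : i < p) :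
    pvPivot (v.set p x) i = pvPivot v i := by
  induction i using Nat.strong_induction_on with
  | _ i ih =>
    conv_lhs => rw [pvPivot]
    conv_rhs => rw [pvPivot]
    rw [pvGetD_set_ne v i p x (by omega)]
    split
    · next hc => exact ih (i-1) (by omega) (by omega)
    · rfl

theorem pvLoopA_spec (p : Nat) : ∀ (v : List Int), p < v.length →
    pvLoopA (v.set p (v.getD p 0 - 1)) p =
      v.take (pvPivot v p) ++ [v.getD (pvPivot v p) 0 - 1] ++
        List.replicate (p - pvPivot v p) 9 ++ v.drop (p + 1) := by
  induction p with
  | zero =>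
    intro v hv
    unfold pvLoopA pvPivot
    simp only [gt_iff_lt, Nat.lt_irrefl, false_and, if_neg, not_false_iff]
    rw [List.set_eq_take_cons_drop _ (by omega)]
    simp
  | succ p ih =>
    intro v hv
    by_cases hb : v.getD (p+1) 0 ≤ 0
    · -- borrow: the decremented last digit is negative
      have hstep : pvLoopA (v.set (p+1) (v.getD (p+1) 0 - 1)) (p+1)
          = pvLoopA (((v.set (p+1) 9)).set p ((v.set (p+1) 9).getD p 0 - 1)) p := by
        rw [pvLoopA]
        have hcond : (0 < p + 1 ∧ (v.set (p+1) (v.getD (p+1) 0 - 1)).getD (p+1) 0 < 0) := by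
          refine ⟨by omega, ?_⟩
          rw [pvGetD_set_self _ _ _ (by omega)]; omega
        rw [if_pos hcond]
        have hss : (v.set (p+1) (v.getD (p+1) 0 - 1)).set (p+1) 9 = v.set (p+1) 9 := by
          simp [List.set_set]
        simp only [Nat.add_sub_cancel, hss]
      rw [hstep]
      set w := v.set (p+1) 9 with hw
      have hwlen : w.length = v.length := by simp [hw]
      have hIH := ih w (by omega)
      rw [hIH]
      have hpv : pvPivot w p = pvPivot v p := pvPivot_set_high v p (p+1) 9 (by omega)
      have hpiv : pvPivot v (p+1) = pvPivot v p := by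
        rw [pvPivot, if_pos ⟨by omega, hb⟩]; simp
      have hle : pvPivot v p ≤ p := pvPivot_le v p
      rw [hpv, hpiv]
      have htake : w.take (pvPivot v p) = v.take (pvPivot v p) := by
        rw [hw]; exact List.take_set_of_le (by omega)
      have hget : w.getD (pvPivot v p) 0 = v.getD (pvPivot v p) 0 := by
        rw [hw]; exact pvGetD_set_ne v _ _ _ (by omega)
      have hdrop : w.drop (p+1) = 9 :: v.drop (p+2) := by
        rw [hw]
        rw [List.drop_eq_getElem_cons (by simpa using hv)]
        rw [List.getElem_set_self (by simpa using hv)]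
        congr 1
        exact List.drop_set_of_lt (by omega)
      rw [htake, hget, hdrop]
      have hcount : p + 1 - pvPivot v p = (p - pvPivot v p) + 1 := by omega
      have hrep : List.replicate (p - pvPivot v p) (9:Int) ++ 9 :: v.drop (p+2)
          = List.replicate (p + 1 - pvPivot v p) 9 ++ v.drop (p+2) := by
        rw [hcount, List.replicate_add]
        simp
      simp only [List.append_assoc, hrep]
    · -- no borrow: loop exits immediately, pivot is p+1
      have hstop : pvLoopA (v.set (p+1) (v.getD (p+1) 0 - 1)) (p+1)
          = v.set (p+1) (v.getD (p+1) 0 - 1) := by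
        rw [pvLoopA, if_neg]
        intro hcl
        have hlt := hcl.2
        rw [pvGetD_set_self _ _ _ (by omega)] at hlt
        omega
      have hpiv : pvPivot v (p+1) = p + 1 := by
        rw [pvPivot, if_neg (by intro hcl; exact hb hcl.2)]
      rw [hstop, hpiv]
      rw [List.set_eq_take_cons_drop _ (by omega)]
      simp

theorem decrement_version_py_eq (v : List Int) :
    decrement_version_py v = decrement_version_py_alt v := by
  unfold decrement_version_py decrement_version_py_alt
  by_cases hv : v.isEmpty
  · simp [hv]
  · simp only [hv, Bool.false_eq_true, if_false]
    have hlen : 0 < v.length := by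
      cases v with
      | nil => simp at hv
      | cons a t => simp
    have hp : v.length - 1 < v.length := by omega
    have hspec := pvLoopA_spec (v.length - 1) v hp
    rw [hspec]
    have hdrop : v.drop (v.length - 1 + 1) = [] := by
      apply List.drop_eq_nil_of_le; omega
    rw [hdrop]
    simp

-- ===== VERDICT (by name: the statement is the Claim_ definition above) =====
theorem decrement_version_py_spec : Claim_equal_decrement_version_py := by
  intro v _
  unfold Spec_decrement_version_py
  exact decrement_version_py_eq v
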